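-- PySemCore.lean, part 8 of 8 (source lines 2625-3059 of 3059): Chars and Str: Python's whitespace/digit/letter sets and split/strip/find/zfill, exact on printable ASCII.
-- An excerpt: the file's own header and imports are repeated below, the enclosing namespaces are reopened, and the other parts are separate documents.
import Lean.Meta.Tactic.Simp.RegisterCommand
/-
PySem — Python-exact primitives for the program-equivalence environment (pv_equiv).

A Lean port of a Python function should compute what the Python computes on every
admitted input. Ports diverge from their Python almost always at a dozen built-ins
(negative indexing, slicing, // and % with a negative divisor, dict overwrite order,
int() parsing, stable sort, min/max ties, the whitespace/digit/case sets of str), not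
in the algorithm. This module implements exactly those built-ins with CPython's
semantics (reference: CPython 3.13), so a port can call them instead of re-inventing
them. Where Python RAISES, the primitive returns `Option` (none = the exception) and a
decidable side condition in `PySem.Raise` names the inputs on which it does not, for
the port's `Pre_`.

Core Lean plus one Lean-frontend module for the `pysem` simp-set registration (no Mathlib import): it compiles in about a minute wherever the grader runs.
Every definition is computable; the `@[simp]` lemmas and the bridge lemmas reduce the
primitives to the usual List/Int/String functions under the side condition that makes
them agree, so proofs about honest ports stay in familiar territory. String functions
are exact on the environment's stated input domain (printable ASCII); outside it the
Unicode tables are not modelled in this version.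

GRADER CODE: kernel-checked, differentially tested against CPython (tests/), trusted.
-/

/-- The `pysem` simp set: every PySem lemma (tagged at the end of PySem.lean — an attribute cannot be used in the module that
registers it), so `simp only [pysem]` / `simp [pysem, …]` tries the whole prelude book without the author knowing each name.
(This import is the one non-core dependency of this file; it costs ≈50 s of compile per container — a third tiny module would
avoid it and is the planned refinement.) -/
register_simp_attr pysem

namespace PySem

/-! ## Chars / Str — Python's whitespace/digit/letter sets and split/strip, exact on printable ASCII + the ASCII controls.
Every function is DEFINED on `List Char` in `PySem.Chars` (kernel-transparent); `PySem.Str` has the same names on `String`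
as thin wrappers (`f s = … (Chars.f s.toList)`), each with a `@[simp]` bridge lemma, so a proof moves to the list form in one
`simp` and never meets Lean's opaque String internals. -/
namespace Chars

/-- `c.isspace()` — Python's set. Exact for code points below 128 (space \t \n \r \x0b \x0c \x1c \x1d \x1e \x1f) and for
U+0085/U+00A0/U+1680/U+2000–200A/U+2028/U+2029/U+202F/U+205F/U+3000 (the rest of Unicode White_Space). -/
def isspace (c : Char) : Bool :=
  let n := c.toNat
  n = 32 || (9 ≤ n && n ≤ 13) || (28 ≤ n && n ≤ 31) || n = 0x85 || n = 0xA0 || n = 0x1680 ||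
  (0x2000 ≤ n && n ≤ 0x200A) || n = 0x2028 || n = 0x2029 || n = 0x202F || n = 0x205F || n = 0x3000
/-- `c.isdigit()` on ASCII (Unicode digits such as '²' or '٣' are outside the stated domain). -/
def isdigit (c : Char) : Bool := '0' ≤ c && c ≤ '9'
def isupper (c : Char) : Bool := 'A' ≤ c && c ≤ 'Z'
def islower (c : Char) : Bool := 'a' ≤ c && c ≤ 'z'
/-- `c.isalpha()` on ASCII. -/
def isalpha (c : Char) : Bool := isupper c || islower c
def isalnum (c : Char) : Bool := isalpha c || isdigit c
/-- ASCII case mapping of one character (Python's str.lower/upper restricted to the stated domain). -/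
def lowerChar (c : Char) : Char := if isupper c then Char.ofNat (c.toNat + 32) else c
def upperChar (c : Char) : Char := if islower c then Char.ofNat (c.toNat - 32) else c

/-- `s.isdigit()` etc. on a whole string: non-empty and every character qualifies. -/
def strIsdigit (s : _root_.List Char) : Bool := !s.isEmpty && s.all isdigit
def strIsalpha (s : _root_.List Char) : Bool := !s.isEmpty && s.all isalpha
def strIsalnum (s : _root_.List Char) : Bool := !s.isEmpty && s.all isalnum
def strIsspace (s : _root_.List Char) : Bool := !s.isEmpty && s.all isspace
def lower (s : _root_.List Char) : _root_.List Char := s.map lowerChar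
def upper (s : _root_.List Char) : _root_.List Char := s.map upperChar

/-- `s.strip()` / `lstrip()` / `rstrip()` with no argument: Python's whitespace set. -/
def lstrip (s : _root_.List Char) : _root_.List Char := s.dropWhile isspace
def rstrip (s : _root_.List Char) : _root_.List Char := (s.reverse.dropWhile isspace).reverse
def strip (s : _root_.List Char) : _root_.List Char := rstrip (lstrip s)
/-- `s.strip(chars)`: strip any of the given characters. -/
def stripChars (s chars : _root_.List Char) : _root_.List Char :=
  let p := fun c => chars.contains c
  ((s.dropWhile p).reverse.dropWhile p).reverse

/-- `s.split()` (no separator): split on RUNS of whitespace, no empty pieces. -/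
def split₀ (s : _root_.List Char) : _root_.List (_root_.List Char) :=
  let rec go : _root_.List Char → _root_.List Char → _root_.List (_root_.List Char) → _root_.List (_root_.List Char)
    | [], cur, acc => if cur.isEmpty then acc.reverse else (cur.reverse :: acc).reverse
    | c :: rest, cur, acc =>
      if isspace c then (if cur.isEmpty then go rest [] acc else go rest [] (cur.reverse :: acc))
      else go rest (c :: cur) acc
  go s [] []

/-- `s.split(sep)` for a NON-EMPTY separator: pieces left to right, empty pieces kept ('a,,b' → ['a','','b']). -/
def splitOn (s sep : _root_.List Char) : _root_.List (_root_.List Char) :=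
  -- fuel = remaining length + 1 bounds the scan (each step consumes ≥ 1 character)
  let rec go : Nat → _root_.List Char → _root_.List Char → _root_.List (_root_.List Char) → _root_.List (_root_.List Char)
    | 0, l, cur, acc => ((cur.reverse ++ l) :: acc).reverse  -- out of fuel (only with an empty sep, which split? refuses): keep the rest
    | _, [], cur, acc => (cur.reverse :: acc).reverse
    | fuel + 1, l@(c :: rest), cur, acc =>
      if sep.isPrefixOf l then go fuel (l.drop sep.length) [] (cur.reverse :: acc) else go fuel rest (c :: cur) acc
  go (s.length + 1) s [] []
/-- `s.split(sep)`: `none` = ValueError (empty separator). -/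
def split? (s sep : _root_.List Char) : Option (_root_.List (_root_.List Char)) :=
  if sep.isEmpty then none else some (splitOn s sep)

/-- `s.splitlines()` (keepends=False): boundaries \n, \r\n, \r, \x0b, \x0c, \x1c, \x1d, \x1e, \x85, U+2028, U+2029; a trailing
boundary does not produce an empty last piece. -/
def splitlines (s : _root_.List Char) : _root_.List (_root_.List Char) :=
  let isB := fun (c : Char) =>
    let n := c.toNat
    n = 10 || n = 13 || n = 11 || n = 12 || n = 28 || n = 29 || n = 30 || n = 0x85 || n = 0x2028 || n = 0x2029
  let rec go : _root_.List Char → _root_.List Char → _root_.List (_root_.List Char) → _root_.List (_root_.List Char)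
    | [], cur, acc => if cur.isEmpty then acc.reverse else (cur.reverse :: acc).reverse
    | '\r' :: '\n' :: rest, cur, acc => go rest [] (cur.reverse :: acc)
    | c :: rest, cur, acc => if isB c then go rest [] (cur.reverse :: acc) else go rest (c :: cur) acc
  go s [] []

/-- `sep.join(parts)`. -/
def join (sep : _root_.List Char) (parts : _root_.List (_root_.List Char)) : _root_.List Char := sep.intercalate parts

@[simp] theorem join_nil (sep : _root_.List Char) : join sep [] = [] := rfl
@[simp] theorem join_singleton (sep p : _root_.List Char) : join sep [p] = p := by simp [join, _root_.List.intercalate, _root_.List.intersperse]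
theorem join_cons_cons (sep p q : _root_.List Char) (rest : _root_.List (_root_.List Char)) : join sep (p :: q :: rest) = p ++ sep ++ join sep (q :: rest) := by
  simp [join, _root_.List.intercalate]
/-- `''.join(map(str, cs))` of single characters is the string of those characters. -/
@[simp] theorem join_nil_singletons (cs : _root_.List Char) : join [] (cs.map fun c => [c]) = cs := by
  induction cs with
  | nil => rfl
  | cons c t ih =>
    cases t with
    | nil => simp [join, _root_.List.intercalate]
    | cons d u => rw [_root_.List.map_cons, _root_.List.map_cons, join_cons_cons]; simpa using ih

/-- `s.startswith(p)` / `s.endswith(p)`. -/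
def startswith (s p : _root_.List Char) : Bool := p.isPrefixOf s
def endswith (s p : _root_.List Char) : Bool := p.isSuffixOf s
/-- `s.find(sub)`: first code-point index or -1; `''` is found at 0. -/
def find (s sub : _root_.List Char) : _root_.Int :=
  let rec go : _root_.List Char → Nat → _root_.Int
    | [], k => if sub.isEmpty then (k : _root_.Int) else -1
    | l@(_ :: t), k => if sub.isPrefixOf l then (k : _root_.Int) else go t (k + 1)
  go s 0
/-- `sub in s` (substring test; '' is in every string). -/
def isIn (sub s : _root_.List Char) : Bool := find s sub != -1
/-- `s.count(sub)`: non-overlapping occurrences; `s.count('')` = len(s)+1. -/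
def count (s sub : _root_.List Char) : Nat :=
  if sub.isEmpty then s.length + 1 else
  let rec go : Nat → _root_.List Char → Nat → Nat
    | 0, _, acc => acc
    | _, [], acc => acc
    | fuel + 1, l@(_ :: t), acc => if sub.isPrefixOf l then go fuel (l.drop sub.length) (acc + 1) else go fuel t acc
  go s.length s 0
/-- `s.replace(old, new)` (all occurrences, non-overlapping, left to right); `old = ''` inserts new before every character and at the end. -/
def replace (s old new : _root_.List Char) : _root_.List Char :=
  if old.isEmpty then new ++ (s.flatMap fun c => c :: new) else
  let rec go : Nat → _root_.List Char → _root_.List Char → _root_.List Char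
    | 0, l, acc => acc.reverse ++ l
    | _, [], acc => acc.reverse
    | fuel + 1, l@(c :: t), acc => if old.isPrefixOf l then go fuel (l.drop old.length) (new.reverse ++ acc) else go fuel t (c :: acc)
  go s.length s []

/-- Python `len(s)` (code points). -/
def len (s : _root_.List Char) : _root_.Int := s.length
/-- `s[i]` on code points, negative i from the end; `none` = IndexError. -/
def pyGet? (s : _root_.List Char) (i : _root_.Int) : Option Char := PySem.List.pyGet? s i
def slice (s : _root_.List Char) (start? stop? : Option _root_.Int := none) : _root_.List Char := PySem.List.slice s start? stop?
def slice? (s : _root_.List Char) (start? stop? : Option _root_.Int := none) (step : _root_.Int := 1) : Option (_root_.List Char) :=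
  PySem.List.slice? s start? stop? step


-- ---- lemma pack 3: the Chars indexing/slicing wrappers ARE the List ones (simp moves to PySem.List, where the lemmas live); startswith as a prefix
@[simp] theorem pyGet?_eq_listPyGet? (s : _root_.List Char) (i : _root_.Int) : pyGet? s i = PySem.List.pyGet? s i := rfl
@[simp] theorem slice_eq_listSlice (s : _root_.List Char) (a? b? : Option _root_.Int) : slice s a? b? = PySem.List.slice s a? b? := rfl
@[simp] theorem slice?_eq_listSlice? (s : _root_.List Char) (a? b? : Option _root_.Int) (st : _root_.Int) : slice? s a? b? st = PySem.List.slice? s a? b? st := rfl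
@[simp] theorem len_eq (s : _root_.List Char) : len s = s.length := rfl
theorem startswith_iff (s p : _root_.List Char) : startswith s p = true ↔ p <+: s := by simp [startswith, _root_.List.isPrefixOf_iff_prefix]
theorem endswith_iff (s p : _root_.List Char) : endswith s p = true ↔ p <:+ s := by simp [endswith, _root_.List.isSuffixOf_iff_suffix]

/-- Python `s.zfill(width)`: pad on the left with '0' up to `width` characters; a leading '+'/'-' sign stays in front of the
padding; a string already at least `width` long (or a non-positive width) is returned unchanged. Exact, no cap. -/
def zfill (cs : _root_.List Char) (w : _root_.Int) : _root_.List Char :=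
  if w ≤ (cs.length : _root_.Int) then cs
  else
    match cs with
    | c :: rest =>
      if c = '+' ∨ c = '-' then c :: (_root_.List.replicate (w.toNat - cs.length) '0' ++ rest)
      else _root_.List.replicate (w.toNat - cs.length) '0' ++ cs
    | [] => _root_.List.replicate w.toNat '0'

theorem length_zfill (cs : _root_.List Char) (w : _root_.Int) : (zfill cs w).length = max cs.length w.toNat := by
  unfold zfill
  by_cases hw : w ≤ (cs.length : _root_.Int)
  · rw [if_pos hw]; omega
  · rw [if_neg hw]
    cases cs with
    | nil => simp only [_root_.List.length_replicate, _root_.List.length_nil] at *; omega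
    | cons c rest =>
      by_cases hc : c = '+' ∨ c = '-'
      · simp only [if_pos hc, _root_.List.length_cons, _root_.List.length_append, _root_.List.length_replicate] at *; omega
      · simp only [if_neg hc, _root_.List.length_cons, _root_.List.length_append, _root_.List.length_replicate] at *; omega


/-! ### Lemma pack 4 — str.find / 'sub in s' as a List infix, and where find points -/
private theorem find_go_spec (sub : _root_.List Char) : ∀ (l : _root_.List Char) (k : Nat),
    (find.go sub l k ≠ -1 ↔ sub <:+: l) ∧ -1 ≤ find.go sub l k ∧ find.go sub l k ≤ k + l.length
  | [], k => by
    rw [find.go]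
    cases sub with
    | nil => simp
    | cons c cs => simp
  | c :: t, k => by
    rw [find.go]
    split
    · rename_i hp
      have hp' : sub <+: c :: t := _root_.List.isPrefixOf_iff_prefix.mp hp
      refine ⟨⟨fun _ => hp'.isInfix, fun _ => by omega⟩, by omega, by simp; omega⟩
    · rename_i hp
      have hp' : ¬ sub <+: c :: t := fun h => hp (_root_.List.isPrefixOf_iff_prefix.mpr h)
      obtain ⟨h1, h2, h3⟩ := find_go_spec sub t (k + 1)
      refine ⟨h1.trans ?_, h2, by simp; omega⟩
      rw [_root_.List.infix_cons_iff]; exact ⟨Or.inr, fun h => h.resolve_left hp'⟩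
private theorem find_go_pos (sub : _root_.List Char) : ∀ (l : _root_.List Char) (k : Nat) (r : _root_.Int),
    find.go sub l k = r → 0 ≤ r → ∃ j : Nat, r = k + j ∧ sub <+: l.drop j ∧ ∀ i < j, ¬ sub <+: l.drop i
  | [], k, r, hr, h0 => by
    rw [find.go] at hr
    split at hr
    · rename_i he; subst hr
      have : sub = [] := by simpa using he
      exact ⟨0, by simp, by simp [this], by omega⟩
    · omega
  | c :: t, k, r, hr, h0 => by
    rw [find.go] at hr
    split at hr
    · rename_i hp; subst hr
      exact ⟨0, by simp, by simpa using _root_.List.isPrefixOf_iff_prefix.mp hp, by omega⟩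
    · rename_i hp
      obtain ⟨j, hj, hs, hm⟩ := find_go_pos sub t (k + 1) r hr h0
      refine ⟨j + 1, by omega, by simpa using hs, ?_⟩
      intro i hi
      cases i with
      | zero => simpa using fun h => hp (_root_.List.isPrefixOf_iff_prefix.mpr h)
      | succ i => simpa using hm i (by omega)
private theorem find_eq_go (s sub : _root_.List Char) : find s sub = find.go sub s 0 := rfl
/-- s.find(sub) != -1  /  sub in s  is: sub occurs contiguously in s (List infix '<:+:'). -/
theorem find_ne_neg_one_iff (s sub : _root_.List Char) : find s sub ≠ -1 ↔ sub <:+: s := (find_go_spec sub s 0).1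
theorem find_eq_neg_one_iff (s sub : _root_.List Char) : find s sub = -1 ↔ ¬ sub <:+: s := by
  rw [← find_ne_neg_one_iff]; exact Classical.not_not.symm
theorem neg_one_le_find (s sub : _root_.List Char) : -1 ≤ find s sub := (find_go_spec sub s 0).2.1
theorem find_le_length (s sub : _root_.List Char) : find s sub ≤ s.length := by have := (find_go_spec sub s 0).2.2; simpa using this
theorem find_nonneg_iff (s sub : _root_.List Char) : 0 ≤ find s sub ↔ sub <:+: s := by
  rw [← find_ne_neg_one_iff]; have := neg_one_le_find s sub; omega
theorem isIn_iff_infix (sub s : _root_.List Char) : isIn sub s = true ↔ sub <:+: s := by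
  rw [← find_ne_neg_one_iff]; simp [isIn, bne_iff_ne]
theorem isIn_eq_false_iff (sub s : _root_.List Char) : isIn sub s = false ↔ ¬ sub <:+: s := by
  rw [← isIn_iff_infix]; simp
@[simp] theorem isIn_nil (s : _root_.List Char) : isIn [] s = true := (isIn_iff_infix [] s).mpr _root_.List.nil_infix
@[simp] theorem find_nil (s : _root_.List Char) : find s [] = 0 := by
  have h1 := (find_nonneg_iff s []).mpr _root_.List.nil_infix
  obtain ⟨j, hj, -, hm⟩ := find_go_pos [] s 0 _ rfl h1
  cases j with
  | zero => simpa [find_eq_go] using hj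
  | succ j => exact absurd (_root_.List.nil_prefix) (hm 0 (by omega))
/-- WHERE s.find(sub) points when it is ≥ 0: sub starts there, and at no earlier position. -/
theorem find_spec {s sub : _root_.List Char} (h : 0 ≤ find s sub) :
    sub <+: s.drop (find s sub).toNat ∧ ∀ i < (find s sub).toNat, ¬ sub <+: s.drop i := by
  obtain ⟨j, hj, hs, hm⟩ := find_go_pos sub s 0 _ rfl h
  rw [find_eq_go, hj]; simpa using ⟨hs, hm⟩
/-- 'some suffix of s starts with sub' (the form an index loop over s proves) is  sub in s. -/
theorem exists_prefix_drop_iff_isIn (sub s : _root_.List Char) : (∃ j : Nat, sub <+: s.drop j) ↔ isIn sub s = true := by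
  rw [isIn_iff_infix]
  constructor
  · rintro ⟨j, hj⟩; exact hj.isInfix.trans (_root_.List.drop_suffix j s).isInfix
  · intro h; have h0 := (find_nonneg_iff s sub).mpr h; exact ⟨_, (find_spec h0).1⟩

/-! ### Pack 5 — str.find with bounds, str.split with maxsplit. -/
/-- Python 's.find(sub, start, end)' (end omitted = none): start/end are read as SLICE bounds (negative from the end, end clamped to len),
the search runs inside s[start:end] and the answer is an index into s, or -1. CPython's one asymmetry is kept: a start beyond len(s) gives -1
even for the empty sub ('abc'.find('', 4) == -1 but 'abc'.find('', 3) == 3). -/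
def findFrom (s sub : _root_.List Char) (start : _root_.Int) (end? : Option _root_.Int := none) : _root_.Int :=
  let n : _root_.Int := s.length
  let e : _root_.Int := match end? with
    | none => n
    | some e => if n < e then n else if e < 0 then (if e + n < 0 then 0 else e + n) else e
  let st : _root_.Int := if start < 0 then (if start + n < 0 then 0 else start + n) else start
  if e < st then -1 else
    let r := find ((s.take e.toNat).drop st.toNat) sub
    if r = -1 then -1 else st + r
/-- Python 's.split(sep, maxsplit)' for a NON-EMPTY sep: at most maxsplit cuts (the rest stays in the last piece); maxsplit < 0 = no limit. -/
def splitOnMax (s sep : _root_.List Char) (maxsplit : _root_.Int) : _root_.List (_root_.List Char) :=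
  if maxsplit < 0 then splitOn s sep else
  let rec go : Nat → Nat → _root_.List Char → _root_.List Char → _root_.List (_root_.List Char) → _root_.List (_root_.List Char)
    | 0, _, l, cur, acc => ((cur.reverse ++ l) :: acc).reverse
    | _, _, [], cur, acc => (cur.reverse :: acc).reverse
    | fuel + 1, m, l@(c :: rest), cur, acc =>
      if m = 0 then ((cur.reverse ++ l) :: acc).reverse
      else if sep.isPrefixOf l then go fuel (m - 1) (l.drop sep.length) [] (cur.reverse :: acc) else go fuel m rest (c :: cur) acc
  go (s.length + 1) maxsplit.toNat s [] []
/-- Python 's.split(sep, maxsplit)': none = ValueError (empty sep). -/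
def splitMax? (s sep : _root_.List Char) (maxsplit : _root_.Int) : Option (_root_.List (_root_.List Char)) :=
  if sep.isEmpty then none else some (splitOnMax s sep maxsplit)
/-- Python 's.split(None, maxsplit)' / 's.split(maxsplit=n)': whitespace runs, at most maxsplit words split off, the remainder (leading
whitespace removed, trailing kept) as the last piece; maxsplit < 0 = s.split(). -/
def split₀Max (s : _root_.List Char) (maxsplit : _root_.Int) : _root_.List (_root_.List Char) :=
  if maxsplit < 0 then split₀ s else
  let rec go : Nat → Nat → _root_.List Char → _root_.List (_root_.List Char) → _root_.List (_root_.List Char)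
    | 0, _, _, acc => acc.reverse
    | fuel + 1, m, l, acc =>
      match l.dropWhile isspace with
      | [] => acc.reverse
      | l' => if m = 0 then (l' :: acc).reverse
              else go fuel (m - 1) (l'.dropWhile (fun c => !isspace c)) (l'.takeWhile (fun c => !isspace c) :: acc)
  go (s.length + 1) maxsplit.toNat s []

/-- Python 's.rfind(sub)': the HIGHEST index where sub starts, or -1 ('' is found at len(s)). -/
def rfind (s sub : _root_.List Char) : _root_.Int :=
  let rec go : Nat → _root_.Int
    | 0 => if sub.isPrefixOf s then 0 else -1
    | j + 1 => if sub.isPrefixOf (s.drop (j + 1)) then ((j + 1 : Nat) : _root_.Int) else go j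
  go s.length
/-- Python 's.rfind(sub, start, end)': bounds as for findFrom (slice semantics; start past len(s) gives -1). -/
def rfindFrom (s sub : _root_.List Char) (start : _root_.Int) (end? : Option _root_.Int := none) : _root_.Int :=
  let n : _root_.Int := s.length
  let e : _root_.Int := match end? with
    | none => n
    | some e => if n < e then n else if e < 0 then (if e + n < 0 then 0 else e + n) else e
  let st : _root_.Int := if start < 0 then (if start + n < 0 then 0 else start + n) else start
  if e < st then -1 else
    let r := rfind ((s.take e.toNat).drop st.toNat) sub
    if r = -1 then -1 else st + r
/-- Python's  s < t  on str compares code points lexicographically — that IS Lean's '<' on List Char (and on String): port 's < t' as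
's.toList < t.toList' (decidable; List.Lex lemmas apply). This Bool form is for ports that store the comparison. -/
def strLt (s t : _root_.List Char) : Bool := decide (s < t)

/-- s.find(sub, k) from a natural start k ≤ len(s) is the plain find on s[k:], re-based (so find_ne_neg_one_iff / find_spec apply to it). -/
theorem findFrom_natCast (s sub : _root_.List Char) (k : Nat) (hk : k ≤ s.length) :
    findFrom s sub (k : _root_.Int) none = (if find (s.drop k) sub = -1 then -1 else (k : _root_.Int) + find (s.drop k) sub) := by
  unfold findFrom
  have h1 : ¬ ((k : _root_.Int) < 0) := by omega
  have h2 : ¬ ((s.length : _root_.Int) < (k : _root_.Int)) := by omega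
  simp only [h1, h2, ↓reduceIte, Int.toNat_natCast, _root_.List.take_length]
@[simp] theorem findFrom_zero (s sub : _root_.List Char) : findFrom s sub 0 none = find s sub := by
  rw [show (0 : _root_.Int) = ((0 : Nat) : _root_.Int) by rfl, findFrom_natCast s sub 0 (by omega)]
  simp only [_root_.List.drop_zero]; split <;> simp_all
theorem findFrom_natCast_eq_neg_one_iff (s sub : _root_.List Char) (k : Nat) (hk : k ≤ s.length) :
    findFrom s sub (k : _root_.Int) none = -1 ↔ ¬ sub <:+: s.drop k := by
  rw [findFrom_natCast s sub k hk, ← find_eq_neg_one_iff]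
  have := neg_one_le_find (s.drop k) sub
  split <;> constructor <;> intro h <;> first | assumption | omega | simp_all
/-- WHERE s.find(sub, k) points when it is not -1: at or after k, sub starts there, and nowhere in between. -/
theorem findFrom_natCast_spec (s sub : _root_.List Char) (k : Nat) (hk : k ≤ s.length) (h : findFrom s sub (k : _root_.Int) none ≠ -1) :
    (k : _root_.Int) ≤ findFrom s sub k none ∧ sub <+: s.drop (findFrom s sub k none).toNat ∧
      ∀ i : Nat, k ≤ i → i < (findFrom s sub k none).toNat → ¬ sub <+: s.drop i := by
  rw [findFrom_natCast s sub k hk] at h ⊢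
  by_cases hf : find (s.drop k) sub = -1
  · simp [hf] at h
  · simp only [hf, ↓reduceIte]
    have h0 : 0 ≤ find (s.drop k) sub := by have := neg_one_le_find (s.drop k) sub; omega
    obtain ⟨h1, h2⟩ := find_spec h0
    have e : ∀ j, (s.drop k).drop j = s.drop (k + j) := fun j => by simp [_root_.List.drop_drop]
    refine ⟨by omega, ?_, ?_⟩
    · rw [show ((k : _root_.Int) + find (s.drop k) sub).toNat = k + (find (s.drop k) sub).toNat by omega, ← e]; exact h1
    · intro i hki hi
      have := h2 (i - k) (by omega)
      rwa [e, show k + (i - k) = i by omega] at this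
theorem splitMax?_of_neg (s sep : _root_.List Char) {m : _root_.Int} (h : m < 0) : splitMax? s sep m = split? s sep := by
  simp [splitMax?, split?, splitOnMax, h]
theorem split₀Max_of_neg (s : _root_.List Char) {m : _root_.Int} (h : m < 0) : split₀Max s m = split₀ s := by
  simp [split₀Max, h]

end Chars

/-! `PySem.Str`: the same API on `String` — thin wrappers over `PySem.Chars`; `simp` with the bridge lemma moves a goal to the list form. -/
namespace Str

def isspace := Chars.isspace
def isdigit := Chars.isdigit
def isalpha := Chars.isalpha
def isalnum := Chars.isalnum
def isupper := Chars.isupper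
def islower := Chars.islower
def strIsdigit (s : String) : Bool := Chars.strIsdigit s.toList
def strIsalpha (s : String) : Bool := Chars.strIsalpha s.toList
def strIsalnum (s : String) : Bool := Chars.strIsalnum s.toList
def strIsspace (s : String) : Bool := Chars.strIsspace s.toList
def lower (s : String) : String := String.ofList (Chars.lower s.toList)
def upper (s : String) : String := String.ofList (Chars.upper s.toList)
def lstrip (s : String) : String := String.ofList (Chars.lstrip s.toList)
def rstrip (s : String) : String := String.ofList (Chars.rstrip s.toList)
def strip (s : String) : String := String.ofList (Chars.strip s.toList)
def stripChars (s chars : String) : String := String.ofList (Chars.stripChars s.toList chars.toList)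
def split₀ (s : String) : _root_.List String := (Chars.split₀ s.toList).map String.ofList
def split? (s sep : String) : Option (_root_.List String) := (Chars.split? s.toList sep.toList).map (·.map String.ofList)
def splitlines (s : String) : _root_.List String := (Chars.splitlines s.toList).map String.ofList
def join (sep : String) (parts : _root_.List String) : String := String.ofList (Chars.join sep.toList (parts.map String.toList))
def startswith (s p : String) : Bool := Chars.startswith s.toList p.toList
def endswith (s p : String) : Bool := Chars.endswith s.toList p.toList
def find (s sub : String) : _root_.Int := Chars.find s.toList sub.toList
/-- `sub in s`. -/
def isIn (sub s : String) : Bool := Chars.isIn sub.toList s.toList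
def count (s sub : String) : Nat := Chars.count s.toList sub.toList
def replace (s old new : String) : String := String.ofList (Chars.replace s.toList old.toList new.toList)
/-- Python `len(s)`: code points (= s.toList.length; Lean's own String.length is an opaque constant to the kernel). -/
def len (s : String) : _root_.Int := s.toList.length
@[simp] theorem len_eq (s : String) : len s = s.toList.length := rfl
def pyGet? (s : String) (i : _root_.Int) : Option Char := Chars.pyGet? s.toList i
def slice (s : String) (start? stop? : Option _root_.Int := none) : String := String.ofList (Chars.slice s.toList start? stop?)
def slice? (s : String) (start? stop? : Option _root_.Int := none) (step : _root_.Int := 1) : Option String :=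
  (Chars.slice? s.toList start? stop? step).map String.ofList

-- bridge lemmas: one 'simp' moves a String-level goal to the List Char definitions
@[simp] theorem toList_lower (s : String) : (lower s).toList = Chars.lower s.toList := by simp [lower]

/-- Python `s.zfill(width)` (see Chars.zfill). -/
def zfill (s : String) (w : _root_.Int) : String := String.ofList (Chars.zfill s.toList w)

@[simp] theorem toList_zfill (s : String) (w : _root_.Int) : (zfill s w).toList = Chars.zfill s.toList w := by simp [zfill]
@[simp] theorem toList_upper (s : String) : (upper s).toList = Chars.upper s.toList := by simp [upper]
@[simp] theorem toList_strip (s : String) : (strip s).toList = Chars.strip s.toList := by simp [strip]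
@[simp] theorem toList_lstrip (s : String) : (lstrip s).toList = Chars.lstrip s.toList := by simp [lstrip]
@[simp] theorem toList_rstrip (s : String) : (rstrip s).toList = Chars.rstrip s.toList := by simp [rstrip]
@[simp] theorem toList_replace (s o n : String) : (replace s o n).toList = Chars.replace s.toList o.toList n.toList := by simp [replace]
@[simp] theorem toList_slice (s : String) (a? b? : Option _root_.Int) : (slice s a? b?).toList = Chars.slice s.toList a? b? := by simp [slice]
@[simp] theorem toList_join (sep : String) (parts : _root_.List String) :
    (join sep parts).toList = Chars.join sep.toList (parts.map String.toList) := by simp [join]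
@[simp] theorem split₀_map_toList (s : String) : (split₀ s).map String.toList = Chars.split₀ s.toList := by simp [split₀, Function.comp_def]
@[simp] theorem splitlines_map_toList (s : String) : (splitlines s).map String.toList = Chars.splitlines s.toList := by
  simp [splitlines, Function.comp_def]
@[simp] theorem strIsdigit_eq (s : String) : strIsdigit s = Chars.strIsdigit s.toList := rfl
@[simp] theorem strIsalpha_eq (s : String) : strIsalpha s = Chars.strIsalpha s.toList := rfl
@[simp] theorem strIsalnum_eq (s : String) : strIsalnum s = Chars.strIsalnum s.toList := rfl
@[simp] theorem strIsspace_eq (s : String) : strIsspace s = Chars.strIsspace s.toList := rfl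
@[simp] theorem find_eq (s t : String) : find s t = Chars.find s.toList t.toList := rfl
@[simp] theorem isIn_eq (s t : String) : isIn s t = Chars.isIn s.toList t.toList := rfl
@[simp] theorem count_eq (s t : String) : count s t = Chars.count s.toList t.toList := rfl
@[simp] theorem startswith_eq (s t : String) : startswith s t = Chars.startswith s.toList t.toList := rfl
@[simp] theorem endswith_eq (s t : String) : endswith s t = Chars.endswith s.toList t.toList := rfl
@[simp] theorem pyGet?_eq (s : String) (i : _root_.Int) : pyGet? s i = Chars.pyGet? s.toList i := rfl
@[simp] theorem toList_stripChars (s c : String) : (stripChars s c).toList = Chars.stripChars s.toList c.toList := by simp [stripChars]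
@[simp] theorem split?_map (s sep : String) : (split? s sep).map (·.map String.toList) = Chars.split? s.toList sep.toList := by
  simp [split?, Chars.split?]; split <;> simp [Function.comp_def]
@[simp] theorem slice?_map (s : String) (a? b? : Option _root_.Int) (st : _root_.Int) : (slice? s a? b? st).map String.toList = Chars.slice? s.toList a? b? st := by
  simp [slice?, Function.comp_def]


/-! ### Lemma pack 4 — Str-level corollaries -/
theorem isIn_iff_infix (sub s : String) : isIn sub s = true ↔ sub.toList <:+: s.toList := Chars.isIn_iff_infix _ _
theorem find_ne_neg_one_iff (s sub : String) : find s sub ≠ -1 ↔ sub.toList <:+: s.toList := Chars.find_ne_neg_one_iff _ _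
theorem find_eq_neg_one_iff (s sub : String) : find s sub = -1 ↔ ¬ sub.toList <:+: s.toList := Chars.find_eq_neg_one_iff _ _
theorem find_nonneg_iff (s sub : String) : 0 ≤ find s sub ↔ sub.toList <:+: s.toList := Chars.find_nonneg_iff _ _
/-- s[::-1] on a String. -/
theorem slice?_none_none_neg_one (s : String) : slice? s none none (-1) = some (String.ofList s.toList.reverse) := by
  simp [slice?, PySem.List.slice?_none_none_neg_one]
theorem slice_to_neg_one (s : String) : (slice s none (some (-1))).toList = s.toList.dropLast := by
  simp [PySem.List.slice_to_neg_one]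
@[simp] theorem pyGet?_natCast (s : String) (n : Nat) : pyGet? s (n : _root_.Int) = s.toList[n]? := by simp

/-! ### Pack 5 — Str wrappers -/
def findFrom (s sub : String) (start : _root_.Int) (end? : Option _root_.Int := none) : _root_.Int := Chars.findFrom s.toList sub.toList start end?
def splitMax? (s sep : String) (maxsplit : _root_.Int) : Option (_root_.List String) := (Chars.splitMax? s.toList sep.toList maxsplit).map (·.map String.ofList)
def split₀Max (s : String) (maxsplit : _root_.Int) : _root_.List String := (Chars.split₀Max s.toList maxsplit).map String.ofList
@[simp] theorem findFrom_eq (s sub : String) (st : _root_.Int) (e? : Option _root_.Int) : findFrom s sub st e? = Chars.findFrom s.toList sub.toList st e? := rfl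
@[simp] theorem splitMax?_map (s sep : String) (m : _root_.Int) : (splitMax? s sep m).map (·.map String.toList) = Chars.splitMax? s.toList sep.toList m := by
  simp [splitMax?, Chars.splitMax?]; split <;> simp [Function.comp_def]
@[simp] theorem split₀Max_map_toList (s : String) (m : _root_.Int) : (split₀Max s m).map String.toList = Chars.split₀Max s.toList m := by
  simp [split₀Max, Function.comp_def]
def rfind (s sub : String) : _root_.Int := Chars.rfind s.toList sub.toList
def rfindFrom (s sub : String) (start : _root_.Int) (end? : Option _root_.Int := none) : _root_.Int := Chars.rfindFrom s.toList sub.toList start end?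
@[simp] theorem rfind_eq (s t : String) : rfind s t = Chars.rfind s.toList t.toList := rfl
@[simp] theorem rfindFrom_eq (s t : String) (st : _root_.Int) (e? : Option _root_.Int) : rfindFrom s t st e? = Chars.rfindFrom s.toList t.toList st e? := rfl

-- ---- lemma pack 6: len against String.length, len of a concatenation
/-- len(s) against Lean's String.length (= code points too). -/
theorem len_eq_length (s : String) : len s = s.length := by simp [len]
theorem len_append (s t : String) : len (s ++ t) = len s + len t := by simp [len]

end Str

end PySem
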